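-- pv_equiv track=rewrite | github.com/maloslov/python3-apps | myutils/fdup.py | sortlistbyhash
-- ===== SOURCE A (Python) =====
-- def sortlistbyhash(list2d):
--     resdict = {}
--     cnt_l = 0
--     prev_l = ''
--     for i in sorted(list2d, key=lambda row: (row[1])):
--         if i[1] in resdict:
--             resdict[i[1]].append(i[0])
--         else:
--             resdict[i[1]] = [i[0]]
--     return resdict
-- ===== SOURCE B (Python) =====
-- def sortlistbyhash(list2d):
--     groups = {}
--     for row in list2d:
--         groups.setdefault(row[1], []).append(row[0])
--     return {k: groups[k] for k in sorted(groups)}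
-- ===== Notes on version B (the rewrite author's own statement) =====
-- stated objective: alternative
-- what changed: B hash-groups the rows in a single pass over the unsorted input and then sorts only the distinct keys, instead of A's full sort of all rows before grouping.
import Mathlib
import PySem

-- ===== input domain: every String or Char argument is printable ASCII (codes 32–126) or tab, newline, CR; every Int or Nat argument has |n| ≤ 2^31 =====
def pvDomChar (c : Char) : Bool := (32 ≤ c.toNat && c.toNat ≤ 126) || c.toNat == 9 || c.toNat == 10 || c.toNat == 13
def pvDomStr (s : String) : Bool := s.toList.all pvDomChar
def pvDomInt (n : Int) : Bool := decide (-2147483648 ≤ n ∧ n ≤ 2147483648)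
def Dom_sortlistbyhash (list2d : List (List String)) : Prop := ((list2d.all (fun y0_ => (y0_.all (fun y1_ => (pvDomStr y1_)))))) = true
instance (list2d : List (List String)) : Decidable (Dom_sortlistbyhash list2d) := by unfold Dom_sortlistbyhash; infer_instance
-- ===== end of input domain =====

-- B groups the rows in one pass over the unsorted input and then sorts only the distinct keys,
-- instead of A's sort of the whole row list before grouping (same observed cost; different algorithm).

-- row[1] / row[0]; exact under Pre_ (every row has length ≥ 2)
def pvKey (row : List String) : String := PySem.List.pyGetD row 1 ""
def pvVal (row : List String) : String := PySem.List.pyGetD row 0 ""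

-- ===== PORT A =====
def sortlistbyhash (list2d : List (List String)) : List (String × List String) :=
  ((PySem.List.sorted list2d (fun row => pvKey row) false).foldl
    (fun resdict i =>
      if resdict.contains (pvKey i) then
        -- resdict[i[1]].append(i[0]) : exact, the key is present
        resdict.insert (pvKey i) (resdict.getD (pvKey i) [] ++ [pvVal i])
      else
        resdict.insert (pvKey i) [pvVal i])
    PySem.Dict.empty).items

-- ===== PORT B =====
def sortlistbyhash_alt (list2d : List (List String)) : List (String × List String) :=
  let groups := list2d.foldl
    (fun d row => d.modify (pvKey row) [] (· ++ [pvVal row]))  -- groups.setdefault(row[1], []).append(row[0])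
    PySem.Dict.empty
  -- {k: groups[k] for k in sorted(groups)} : keys are distinct, so the dict is this association list;
  -- groups[k] is exact (k ∈ groups) and ported as getD
  (PySem.List.sorted groups.keys (fun k => k) false).map (fun k => (k, groups.getD k []))

-- ===== PRECONDITION & SPEC =====
-- Pre_ excludes exactly the inputs where Python A raises IndexError: a row with fewer than 2 entries.
def Pre_sortlistbyhash (list2d : List (List String)) : Prop := ∀ row ∈ list2d, 2 ≤ row.length
instance (list2d : List (List String)) : Decidable (Pre_sortlistbyhash list2d) := by unfold Pre_sortlistbyhash; infer_instance
def pvWitness_sortlistbyhash : List (List String) := [["a", "k"], ["b", "j"], ["c", "k"]]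

def Spec_sortlistbyhash (list2d : List (List String)) (out : List (String × List String)) : Prop := out = sortlistbyhash_alt list2d
instance (list2d : List (List String)) (out : List (String × List String)) : Decidable (Spec_sortlistbyhash list2d out) := by unfold Spec_sortlistbyhash; infer_instance

-- ===== CLAIM (what is proved, stated in full; the proofs are below) =====
def Claim_equal_sortlistbyhash : Prop := ∀ (list2d : List (List String)), Dom_sortlistbyhash list2d → Pre_sortlistbyhash list2d → Spec_sortlistbyhash list2d (sortlistbyhash list2d)

-- ===== LEMMAS AND PROOFS =====

-- the common grouping fold (A runs it on the sorted list, B on the input)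
def pvStep (d : PySem.Dict String (List String)) (row : List String) : PySem.Dict String (List String) :=
  d.modify (pvKey row) [] (· ++ [pvVal row])
def pvGroups (ys : List (List String)) : PySem.Dict String (List String) :=
  ys.foldl pvStep PySem.Dict.empty

-- A's if/else branch pair is exactly pvStep
lemma pvStepA_eq : (fun (resdict : PySem.Dict String (List String)) i =>
      if resdict.contains (pvKey i) then
        resdict.insert (pvKey i) (resdict.getD (pvKey i) [] ++ [pvVal i])
      else
        resdict.insert (pvKey i) [pvVal i]) = pvStep := by
  funext d i
  unfold pvStep
  by_cases h : d.contains (pvKey i) = true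
  · simp only [h, if_true]; rfl
  · have hb : d.contains (pvKey i) = false := by simpa using h
    have hg := PySem.Dict.getD_of_not_contains d ([] : List String) hb
    simp only [hb, Bool.false_eq_true, if_false]
    show d.insert (pvKey i) [pvVal i] = d.insert (pvKey i) (d.getD (pvKey i) [] ++ [pvVal i])
    rw [hg, List.nil_append]

lemma pvGroups_getD (ys : List (List String)) (k : String) :
    (pvGroups ys).getD k [] = (ys.filter (fun r => pvKey r == k)).map pvVal := by
  unfold pvGroups pvStep
  have h := PySem.Dict.getD_foldl_modify_append (ys.map (fun r => (pvKey r, pvVal r))) PySem.Dict.empty k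
  rw [List.foldl_map] at h
  rw [h]
  simp [List.filter_map, Function.comp_def, List.map_map, PySem.Dict.getD_empty]

lemma pvGroups_keys (ys : List (List String)) :
    (pvGroups ys).keys = PySem.Set.ofList (ys.map pvKey) := by
  unfold pvGroups pvStep
  have h := PySem.Dict.keys_foldl_modify_key ys pvKey ([] : List String)
    (fun _ row => (· ++ [pvVal row])) PySem.Dict.empty
  simpa [PySem.Dict.keys_empty, PySem.Set.update_nil_left] using h

lemma pvGroups_items (ys : List (List String)) :
    (pvGroups ys).items = (pvGroups ys).keys.map (fun k => (k, (pvGroups ys).getD k [])) := by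
  apply PySem.Dict.items_eq_map_keys
  rw [pvGroups_keys]; exact PySem.Set.nodup_ofList _

lemma ofList_sublist {α : Type} [BEq α] [LawfulBEq α] (xs : List α) :
    (PySem.Set.ofList xs : List α).Sublist xs := by
  induction xs using List.reverseRecOn with
  | nil => simp [PySem.Set.ofList]
  | append_singleton xs x ih =>
    rw [PySem.Set.ofList_append_singleton, PySem.Set.add_eq_ite]
    split_ifs with h
    · exact ih.trans (List.sublist_append_left _ _)
    · exact ih.append_right _

lemma ofList_pairwise_lt (xs : List String) (h : xs.Pairwise (· ≤ ·)) :
    (PySem.Set.ofList xs : List String).Pairwise (· < ·) := by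
  have hle : (PySem.Set.ofList xs : List String).Pairwise (· ≤ ·) := h.sublist (ofList_sublist xs)
  have hne : (PySem.Set.ofList xs : List String).Pairwise (· ≠ ·) := PySem.Set.nodup_ofList xs
  exact (hle.and hne).imp (fun ⟨hl, hn⟩ => lt_of_le_of_ne hl hn)

-- the distinct keys of the key-sorted list ARE sorted(distinct keys of the input)
lemma keys_sorted_eq (list2d : List (List String)) :
    PySem.List.sorted (PySem.Set.ofList (list2d.map pvKey) : List String) (fun k => k) false
      = PySem.Set.ofList ((PySem.List.sorted list2d (fun row => pvKey row) false).map pvKey) := by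
  apply PySem.List.sorted_eq_of_perm_of_pairwise_lt
  · apply (List.perm_ext_iff_of_nodup (PySem.Set.nodup_ofList _) (PySem.Set.nodup_ofList _)).mpr
    intro a
    simp [PySem.Set.mem_ofList, List.mem_map, PySem.List.mem_sorted]
  · exact ofList_pairwise_lt _ (by simpa using PySem.List.sorted_map_key_pairwise list2d pvKey)

-- stability: filtering one key class out of the sorted list gives the input's class, in input order
lemma filter_insertBy (x : List String) (ys : List (List String)) (k : String)
    (h : ys.Pairwise (fun a b => pvKey a ≤ pvKey b)) :
    (PySem.List.insertBy (fun a b => decide (pvKey a < pvKey b)) x ys).filter (fun r => pvKey r == k)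
      = if pvKey x == k then ys.filter (fun r => pvKey r == k) ++ [x]
        else ys.filter (fun r => pvKey r == k) := by
  induction ys with
  | nil =>
    by_cases hx : pvKey x = k <;>
      simp [PySem.List.insertBy, hx]
  | cons y ys ih =>
    have hpw := (List.pairwise_cons.mp h)
    rw [show PySem.List.insertBy (fun a b => decide (pvKey a < pvKey b)) x (y :: ys)
          = if decide (pvKey x < pvKey y) then x :: y :: ys
            else y :: PySem.List.insertBy (fun a b => decide (pvKey a < pvKey b)) x ys by
        simp [PySem.List.insertBy]]
    by_cases hlt : pvKey x < pvKey y
    · simp only [hlt, decide_true, if_true]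
      rw [List.filter_cons (x := x)]
      by_cases hx : pvKey x = k
      · -- every element of y :: ys has key > k, so its filter is empty
        have hempty : (y :: ys).filter (fun r => pvKey r == k) = [] := by
          rw [List.filter_eq_nil_iff]
          intro r hr
          have hyr : pvKey y ≤ pvKey r := by
            rcases hr with _ | hr
            · exact le_refl _
            · exact hpw.1 r (by assumption)
          simp only [beq_iff_eq]
          intro hrk
          exact absurd (hrk ▸ hyr) (not_le.mpr (hx ▸ hlt))
        simp [hx, hempty]
      · simp [hx]
    · simp only [hlt, decide_false, Bool.false_eq_true, if_false]
      rw [List.filter_cons, List.filter_cons, ih hpw.2]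
      split_ifs <;> simp

lemma filter_sorted (xs : List (List String)) (k : String) :
    (PySem.List.sorted xs (fun row => pvKey row) false).filter (fun r => pvKey r == k)
      = xs.filter (fun r => pvKey r == k) := by
  induction xs using List.reverseRecOn with
  | nil => rfl
  | append_singleton xs x ih =>
    have hs : PySem.List.sorted (xs ++ [x]) (fun row => pvKey row) false
        = PySem.List.insertBy (fun a b => decide (pvKey a < pvKey b)) x
            (PySem.List.sorted xs (fun row => pvKey row) false) := by
      rw [PySem.List.sorted_eq_foldl_insertBy, PySem.List.sorted_eq_foldl_insertBy, List.foldl_append]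
      rfl
    rw [hs, filter_insertBy _ _ _ (PySem.List.sorted_pairwise xs pvKey), ih, List.filter_append,
        List.filter_cons, List.filter_nil]
    split_ifs <;> simp

-- ===== VERDICT (by name: the statement is the Claim_ definition above) =====
theorem sortlistbyhash_spec : Claim_equal_sortlistbyhash := by
  intro list2d _ _
  unfold Spec_sortlistbyhash sortlistbyhash sortlistbyhash_alt
  rw [pvStepA_eq]
  show (pvGroups (PySem.List.sorted list2d (fun row => pvKey row) false)).items
      = (PySem.List.sorted (pvGroups list2d).keys (fun k => k) false).map
          (fun k => (k, (pvGroups list2d).getD k []))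
  rw [pvGroups_items, pvGroups_keys, pvGroups_keys, keys_sorted_eq]
  apply List.map_congr_left
  intro k _
  rw [pvGroups_getD, pvGroups_getD, filter_sorted]
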